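-- pv_equiv track=rewrite | github.com/n-chikh/A-constructive-characterisation-of-interval-graphs | src/definition7_proposition4.py | check_itranspose
-- ===== SOURCE A (Python) =====
-- def check_itranspose(dl,tdl):
--     '''Input: two dominance lists
--        Output: (True, the transposition's position), if dl and tdl are
--                (i-1,i)-transposes of each-other;
--                or (False, 0), elsewhere.
--     '''
--     itranspose = False
--     if len(dl) == len(tdl):
--         i = 1
--         #Sub-function returns True if, for an index i, tdl[i+1:] == dl[i+1:]
--         def tau_trans(i):
--             if (tdl[i] == dl[i-1] + 1) and (tdl[i-1] == dl[i] - 1) and (tdl[i+1:] == dl[i+1:]):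
--                 return True
--             else: return False
--     #------------------------------------------------------------------------
--         while (itranspose == False) and (i < len(dl)):
--             if tau_trans(i) == True:
--                 itranspose = True
--             else:
--                 i += 1
--     return itranspose, (None if (itranspose == False) else i)
-- ===== SOURCE B (Python) =====
-- def check_itranspose(dl, tdl):
--     # O(n): precompute the last differing index; the suffix-slice comparison
--     # tdl[i+1:] == dl[i+1:] becomes the O(1) threshold test last <= i.
--     if len(dl) != len(tdl):
--         return False, None
--     n = len(dl)
--     last = -1
--     for j in range(n - 1, -1, -1):
--         if tdl[j] != dl[j]:
--             last = j
--             break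
--     for i in range(1, n):
--         if tdl[i] == dl[i - 1] + 1 and tdl[i - 1] == dl[i] - 1 and last <= i:
--             return True, i
--     return False, None
-- ===== Notes on version B (the rewrite author's own statement) =====
-- stated objective: faster
-- what changed: B precomputes the last index where the two lists differ in one backward pass, turning A's O(n) suffix-slice comparison inside the scan into an O(1) threshold test 'last <= i'.
import Mathlib
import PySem

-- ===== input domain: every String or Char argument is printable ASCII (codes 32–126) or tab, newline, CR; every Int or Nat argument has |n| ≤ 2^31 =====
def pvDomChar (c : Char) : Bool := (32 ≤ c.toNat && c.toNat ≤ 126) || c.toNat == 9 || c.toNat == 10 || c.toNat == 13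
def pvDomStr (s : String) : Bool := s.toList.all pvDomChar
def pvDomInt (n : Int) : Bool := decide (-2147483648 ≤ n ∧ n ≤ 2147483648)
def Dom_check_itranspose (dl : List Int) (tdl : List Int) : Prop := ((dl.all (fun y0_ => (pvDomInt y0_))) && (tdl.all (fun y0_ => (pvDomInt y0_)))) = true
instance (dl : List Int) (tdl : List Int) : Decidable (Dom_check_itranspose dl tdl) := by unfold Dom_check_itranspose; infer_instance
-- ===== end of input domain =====

-- B replaces A's per-index suffix-slice comparison (O(n) inside the scan) by a single
-- backward pass computing the last differing index and an O(1) threshold test: O(n^2) → O(n).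

-- ===== PORT A =====
-- tau_trans(i): tdl[i] == dl[i-1]+1 and tdl[i-1] == dl[i]-1 and tdl[i+1:] == dl[i+1:]
-- (indices are always in range when called from the loop: 1 ≤ i < len; slice with
-- nonnegative start i+1 is List.drop, exact here)
def tauTrans (dl tdl : List Int) (i : Nat) : Bool :=
  tdl.getD i 0 == dl.getD (i - 1) 0 + 1 && tdl.getD (i - 1) 0 == dl.getD i 0 - 1
    && tdl.drop (i + 1) == dl.drop (i + 1)

-- the while loop: i starts at 1, runs while i < len dl; fuel = len dl - i
def aLoop (dl tdl : List Int) (i : Nat) : Nat → Option Nat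
  | 0 => none
  | fuel + 1 => if tauTrans dl tdl i then some i else aLoop dl tdl (i + 1) fuel

def check_itranspose (dl : List Int) (tdl : List Int) : Bool × Option Int :=
  if dl.length == tdl.length then
    match aLoop dl tdl 1 (dl.length - 1) with
    | some i => (true, some (i : Int))
    | none => (false, none)
  else (false, none)

-- ===== PORT B =====
-- backward loop 'for j in range(n-1,-1,-1): if tdl[j] != dl[j]: last=j; break';
-- argument k is j+1, so k=0 means the loop ended without a break
def bLast (dl tdl : List Int) : Nat → Int
  | 0 => -1
  | k + 1 => if tdl.getD k 0 != dl.getD k 0 then (k : Int) else bLast dl tdl k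

-- forward loop 'for i in range(1, n)': first i with the two local conditions and last ≤ i
def bScan (dl tdl : List Int) (last : Int) (i : Nat) : Nat → Option Nat
  | 0 => none
  | fuel + 1 =>
    if tdl.getD i 0 == dl.getD (i - 1) 0 + 1 && tdl.getD (i - 1) 0 == dl.getD i 0 - 1
        && decide (last ≤ (i : Int)) then some i
    else bScan dl tdl last (i + 1) fuel

def check_itranspose_alt (dl : List Int) (tdl : List Int) : Bool × Option Int :=
  if dl.length == tdl.length then
    match bScan dl tdl (bLast dl tdl dl.length) 1 (dl.length - 1) with
    | some i => (true, some (i : Int))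
    | none => (false, none)
  else (false, none)

-- ===== PRECONDITION & SPEC =====
def Spec_check_itranspose (dl : List Int) (tdl : List Int) (out : Bool × Option Int) : Prop := out = check_itranspose_alt dl tdl
instance (dl : List Int) (tdl : List Int) (out : Bool × Option Int) : Decidable (Spec_check_itranspose dl tdl out) := by unfold Spec_check_itranspose; infer_instance

-- ===== CLAIM (what is proved, stated in full; the proofs are below) =====
def Claim_equal_check_itranspose : Prop := ∀ (dl : List Int) (tdl : List Int), Dom_check_itranspose dl tdl → Spec_check_itranspose dl tdl (check_itranspose dl tdl)

-- ===== LEMMAS AND PROOFS =====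

-- bLast ≤ i exactly when the two lists agree at every index in (i, k)
theorem bLast_le_iff (dl tdl : List Int) (k i : Nat) :
    (bLast dl tdl k ≤ (i : Int)) ↔ ∀ j, i < j → j < k → tdl.getD j 0 = dl.getD j 0 := by
  induction k with
  | zero => simp [bLast]
  | succ k ih =>
    simp only [bLast]
    by_cases h : tdl.getD k 0 = dl.getD k 0
    · simp only [h, bne_self_eq_false, Bool.false_eq_true, if_false]
      rw [ih]
      constructor
      · intro hh j hj1 hj2
        rcases Nat.lt_succ_iff_lt_or_eq.mp hj2 with h' | h'
        · exact hh j hj1 h'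
        · subst h'; exact h
      · intro hh j hj1 hj2; exact hh j hj1 (by omega)
    · rw [if_pos (by simpa [bne_iff_ne] using h)]
      constructor
      · intro hk j hj1 hj2
        have hk' : k ≤ i := by exact_mod_cast hk
        exact absurd hj2 (by omega)
      · intro hh
        by_cases hik : i < k
        · exact absurd (hh k (by omega) (by omega)) h
        · exact_mod_cast Nat.le_of_not_lt hik

-- drop equality characterised pointwise (for lists of equal length)
theorem drop_eq_iff (m : Nat) : ∀ (dl tdl : List Int), dl.length = tdl.length →
    ((tdl.drop m = dl.drop m) ↔ ∀ j, m ≤ j → j < dl.length → tdl.getD j 0 = dl.getD j 0) := by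
  induction m with
  | zero =>
    intro dl tdl hlen
    simp only [List.drop_zero, Nat.zero_le, true_implies]
    constructor
    · intro h j _; rw [h]
    · intro h
      apply List.ext_getElem (by omega)
      intro j h1 h2
      have := h j (by omega)
      rwa [List.getD_eq_getElem _ _ h1, List.getD_eq_getElem _ _ h2] at this
  | succ m ih =>
    intro dl tdl hlen
    cases dl with
    | nil => cases tdl with
      | nil => simp
      | cons b tb => simp at hlen
    | cons a ta => cases tdl with
      | nil => simp at hlen
      | cons b tb =>
        simp only [List.drop_succ_cons]
        rw [ih ta tb (by simpa using hlen)]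
        constructor
        · intro h j hj1 hj2
          obtain ⟨j', rfl⟩ : ∃ j', j = j' + 1 := ⟨j - 1, by omega⟩
          simpa using h j' (by omega) (by simpa using hj2)
        · intro h j hj1 hj2
          simpa using h (j + 1) (by omega) (by simpa using hj2)

-- the two loop bodies agree for in-range i, hence the loops agree
theorem loops_eq (dl tdl : List Int) (hlen : dl.length = tdl.length) :
    ∀ (fuel i : Nat), i + fuel = dl.length →
      aLoop dl tdl i fuel = bScan dl tdl (bLast dl tdl dl.length) i fuel := by
  intro fuel
  induction fuel with
  | zero => intro i _; rfl
  | succ fuel ih =>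
    intro i hi
    simp only [aLoop, bScan, tauTrans]
    have hcond : (tdl.drop (i + 1) == dl.drop (i + 1))
        = decide (bLast dl tdl dl.length ≤ (i : Int)) := by
      rw [Bool.eq_iff_iff]
      simp only [beq_iff_eq, decide_eq_true_eq]
      rw [drop_eq_iff (i + 1) dl tdl hlen, bLast_le_iff]
      constructor
      · intro h j hj1 hj2; exact h j (by omega) hj2
      · intro h j hj1 hj2; exact h j (by omega) hj2
    simp only [hcond, ih (i + 1) (by omega)]

-- ===== VERDICT (by name: the statement is the Claim_ definition above) =====
theorem check_itranspose_spec : Claim_equal_check_itranspose := by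
  intro dl tdl _
  unfold Spec_check_itranspose check_itranspose check_itranspose_alt
  by_cases hlen : dl.length = tdl.length
  · rw [if_pos (by simpa using hlen), if_pos (by simpa using hlen)]
    cases dl with
    | nil => rfl
    | cons a ta =>
      rw [loops_eq (a :: ta) tdl hlen ((a :: ta).length - 1) 1
        (by simp [List.length_cons]; omega)]
  · rw [if_neg (by simpa using hlen), if_neg (by simpa using hlen)]
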